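-- pv_equiv track=rewrite | github.com/KateLy1/RK2 | sem2_task4.py | maxMinMultiplication
-- ===== SOURCE A (Python) =====
-- def maxMinMultiplication (data):
--     if len(data) < 3 or None in data:
--         return -1
--     min_index = 1
--     max_index = 2
--     i = 0
--     while i < len(data):
--         min_index = i
--         i = 2 * i + 1
--     i = 0
--     while i < len(data):
--         max_index = i
--         i = 2 * i + 2
--     result = data[min_index] * data[max_index]
--     return result
-- ===== SOURCE B (Python) =====
-- def maxMinMultiplication(data):
--     if len(data) < 3 or None in data:
--         return -1
--     n = len(data)
--     min_index = (1 << (n.bit_length() - 1)) - 1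
--     max_index = (1 << ((n + 1).bit_length() - 1)) - 2
--     return data[min_index] * data[max_index]
-- ===== Notes on version B (the rewrite author's own statement) =====
-- stated objective: simpler
-- what changed: Replaces the two logarithmic index-finding while loops by closed-form bit_length formulas (largest 2^k-1 < n and largest 2^k-2 < n).
import Mathlib
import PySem

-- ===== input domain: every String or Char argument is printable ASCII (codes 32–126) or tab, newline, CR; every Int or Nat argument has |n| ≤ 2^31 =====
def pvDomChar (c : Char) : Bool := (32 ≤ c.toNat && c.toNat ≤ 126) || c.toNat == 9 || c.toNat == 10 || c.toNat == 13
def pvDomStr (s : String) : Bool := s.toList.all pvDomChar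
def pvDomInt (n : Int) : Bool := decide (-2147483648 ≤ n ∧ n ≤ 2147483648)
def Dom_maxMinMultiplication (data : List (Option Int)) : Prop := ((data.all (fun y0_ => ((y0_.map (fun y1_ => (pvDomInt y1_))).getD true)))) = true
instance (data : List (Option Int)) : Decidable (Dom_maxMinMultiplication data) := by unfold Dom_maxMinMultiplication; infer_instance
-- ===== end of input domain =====

-- B replaces A's two logarithmic index-finding while loops by closed-form bit-length formulas (objective: simpler).

-- ===== PORT A =====
-- 'while i < n: min_index = i; i = 2*i+1' (i, indices are always nonneg, so Nat state is exact)
def loopMinA (n i idx : Nat) : Nat :=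
  if i < n then loopMinA n (2 * i + 1) i else idx
termination_by n - i
decreasing_by omega

-- 'while i < n: max_index = i; i = 2*i+2'
def loopMaxA (n i idx : Nat) : Nat :=
  if i < n then loopMaxA n (2 * i + 2) i else idx
termination_by n - i
decreasing_by omega

def maxMinMultiplication (data : List (Option Int)) : Int :=
  if data.length < 3 ∨ data.contains none then -1
  else
    let min_index := loopMinA data.length 0 1
    let max_index := loopMaxA data.length 0 2
    -- data[min_index] * data[max_index]; the guard makes both indices in range and both
    -- elements non-None, so the getD defaults are unreachable (exact on this branch)
    (((PySem.List.pyGet? data (min_index : Int)).getD none).getD 0) *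
      (((PySem.List.pyGet? data (max_index : Int)).getD none).getD 0)

-- ===== PORT B =====
def maxMinMultiplication_alt (data : List (Option Int)) : Int :=
  if data.length < 3 ∨ data.contains none then -1
  else
    let n := data.length
    -- n.bit_length() - 1 = Nat.log2 n for n ≥ 1
    let min_index := (1 <<< Nat.log2 n) - 1
    let max_index := (1 <<< Nat.log2 (n + 1)) - 2
    (((PySem.List.pyGet? data (min_index : Int)).getD none).getD 0) *
      (((PySem.List.pyGet? data (max_index : Int)).getD none).getD 0)

-- ===== PRECONDITION & SPEC =====
def Spec_maxMinMultiplication (data : List (Option Int)) (out : Int) : Prop := out = maxMinMultiplication_alt data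
instance (data : List (Option Int)) (out : Int) : Decidable (Spec_maxMinMultiplication data out) := by unfold Spec_maxMinMultiplication; infer_instance

-- ===== CLAIM (what is proved, stated in full; the proofs are below) =====
def Claim_equal_maxMinMultiplication : Prop := ∀ (data : List (Option Int)), Dom_maxMinMultiplication data → Spec_maxMinMultiplication data (maxMinMultiplication data)

-- ===== LEMMAS AND PROOFS =====

theorem loopMinA_pow (n k idx : Nat) (h : 2 ^ k ≤ n) :
    loopMinA n (2 ^ k - 1) idx = 2 ^ Nat.log2 n - 1 := by
  rw [loopMinA]
  have hpos : 1 ≤ 2 ^ k := Nat.one_le_two_pow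
  have hstep : 2 * (2 ^ k - 1) + 1 = 2 ^ (k + 1) - 1 := by
    have : 2 ^ (k + 1) = 2 * 2 ^ k := by ring
    omega
  rw [if_pos (by omega), hstep]
  by_cases h2 : 2 ^ (k + 1) ≤ n
  · exact loopMinA_pow n (k + 1) (2 ^ k - 1) h2
  · rw [loopMinA, if_neg (by omega)]
    have hlog : Nat.log2 n = k := by
      rw [Nat.log2_eq_log_two]
      exact Nat.log_eq_of_pow_le_of_lt_pow h (by omega)
    rw [hlog]
termination_by n - 2 ^ k
decreasing_by
  have : 2 ^ (k + 1) = 2 * 2 ^ k := by ring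
  omega

theorem loopMaxA_pow (n k idx : Nat) (hk : 1 ≤ k) (h : 2 ^ k ≤ n + 1) (hn : 3 ≤ n) :
    loopMaxA n (2 ^ k - 2) idx = 2 ^ Nat.log2 (n + 1) - 2 := by
  rw [loopMaxA]
  have hpos : 2 ≤ 2 ^ k := by
    calc 2 = 2 ^ 1 := by norm_num
    _ ≤ 2 ^ k := Nat.pow_le_pow_right (by norm_num) hk
  have hstep : 2 * (2 ^ k - 2) + 2 = 2 ^ (k + 1) - 2 := by
    have : 2 ^ (k + 1) = 2 * 2 ^ k := by ring
    omega
  rw [if_pos (by omega), hstep]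
  by_cases h2 : 2 ^ (k + 1) ≤ n + 1
  · exact loopMaxA_pow n (k + 1) (2 ^ k - 2) (by omega) h2 hn
  · rw [loopMaxA, if_neg (by omega)]
    have hlog : Nat.log2 (n + 1) = k := by
      rw [Nat.log2_eq_log_two]
      exact Nat.log_eq_of_pow_le_of_lt_pow h (by omega)
    rw [hlog]
termination_by n - 2 ^ k
decreasing_by
  have : 2 ^ (k + 1) = 2 * 2 ^ k := by ring
  omega

-- ===== VERDICT (by name: the statement is the Claim_ definition above) =====
theorem maxMinMultiplication_spec : Claim_equal_maxMinMultiplication := by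
  intro data _
  unfold Spec_maxMinMultiplication maxMinMultiplication maxMinMultiplication_alt
  by_cases hg : data.length < 3 ∨ data.contains none
  · rw [if_pos hg, if_pos hg]
  · rw [if_neg hg, if_neg hg]
    have hn : 3 ≤ data.length := by
      rcases Nat.lt_or_ge data.length 3 with h | h
      · exact absurd (Or.inl h) hg
      · exact h
    have hmin : loopMinA data.length 0 1 = 2 ^ Nat.log2 data.length - 1 := by
      have := loopMinA_pow data.length 0 1 (by simpa using Nat.one_le_iff_ne_zero.mpr (by omega))
      simpa using this
    have hmax : loopMaxA data.length 0 2 = 2 ^ Nat.log2 (data.length + 1) - 2 := by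
      have := loopMaxA_pow data.length 1 2 le_rfl (by omega) hn
      simpa using this
    simp only [hmin, hmax, Nat.shiftLeft_eq, one_mul]
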